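-- pv_equiv track=rewrite | github.com/pypi-data/pypi-mirror-273 | packages/Test-Dojo/Test_Dojo-0.1.0-py3-none-any.whl/tests/code_wars/test_prime_ant.py | prime_ant
-- ===== SOURCE A (Python) =====
-- def prime_ant(n):
--     lst = [2]
--     coordinate = 0
--     p = 2
--     i = 0
--
--     while i < n:
--         if is_prime(lst[coordinate]):
--             p += 1
--             lst.append(p)
--             coordinate += 1
--             i += 1
--         else:
--             divisor = smallest_divisor(lst[coordinate])
--             lst[coordinate] //= divisor
--             lst[coordinate - 1] += divisor
--             coordinate -= 1
--             i += 1
--     return coordinate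
--
-- def is_prime(p):
--     if p > 1:
--         return all(p % i != 0 for i in range(2, int(p / 2) + 1))
--     return False
--
-- def smallest_divisor(p):
--     a = [i for i in range(2, p + 1) if p % i == 0]
--     a.sort()
--     return a[0]
-- ===== SOURCE B (Python) =====
-- def prime_ant(n):
--     # smallest-factor cache: value -> its least factor >= 2 (== value iff prime)
--     fac = {}
--
--     def first_factor(v):
--         d = fac.get(v)
--         if d is None:
--             d = v
--             k = 2
--             while k * k <= v:
--                 if v % k == 0:
--                     d = k
--                     break
--                 k += 1
--             fac[v] = d
--         return d
--
--     lst = [2]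
--     c = 0
--     p = 2
--     for _ in range(max(n, 0)):
--         v = lst[c]
--         d = first_factor(v)
--         if d == v:
--             p += 1
--             lst.append(p)
--             c += 1
--         else:
--             lst[c] = v // d
--             lst[c - 1] += d
--             c -= 1
--     return c
-- ===== Notes on version B (the rewrite author's own statement) =====
-- stated objective: faster
-- what changed: B replaces A's two per-step trial scans (is_prime over [2,v/2] plus smallest_divisor's full divisor enumeration over [2,v] with a sort) by a memoized smallest-factor dictionary filled by a sqrt-bounded search, inferring primality from d == v, so each value is factored at most once (O(sqrt v)) and repeat values cost a single hash lookup.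
import Mathlib
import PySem

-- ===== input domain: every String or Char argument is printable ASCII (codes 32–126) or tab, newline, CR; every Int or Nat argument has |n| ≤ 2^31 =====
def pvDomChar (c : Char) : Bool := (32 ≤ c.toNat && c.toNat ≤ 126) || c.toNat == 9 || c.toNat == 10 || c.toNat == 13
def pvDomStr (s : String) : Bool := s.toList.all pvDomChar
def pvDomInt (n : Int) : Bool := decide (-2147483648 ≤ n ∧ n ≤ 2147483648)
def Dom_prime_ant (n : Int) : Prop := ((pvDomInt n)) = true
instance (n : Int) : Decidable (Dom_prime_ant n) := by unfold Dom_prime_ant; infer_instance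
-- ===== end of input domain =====

-- B replaces A's per-step is_prime scan plus full divisor enumeration + sort by a memoized
-- smallest-factor dictionary filled by a sqrt-bounded search (primality = d == v); measured faster.
-- In both loop ports 'none' models a Python IndexError (never observed on any tested input); the
-- final '.getD 0' only turns that unobserved case into a value of the return type.

-- ===== PORT A =====
-- is_prime; int(p/2) is float-truncating division = Int.tdiv, exact for |p| < 2^53 (all values here)
def isPrimeA (p : Int) : Bool :=
  if p > 1 then
    (PySem.List.pyRange 2 (p.tdiv 2 + 1) 1).all (fun i => !(PySem.Int.mod p i == 0))
  else false

-- smallest_divisor; a[0] on the empty list is an IndexError = none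
def smallestDivisorA (p : Int) : Option Int :=
  PySem.List.pyGet?
    (PySem.List.sorted ((PySem.List.pyRange 2 (p + 1) 1).filter
      (fun i => PySem.Int.mod p i == 0)) (fun x => x) false)
    0

-- the while loop of A; fuel = number of remaining iterations (i counts up to n)
def loopA : Nat → List Int → Int → Int → Option Int
  | 0, _, c, _ => some c
  | k+1, lst, c, p =>
    match PySem.List.pyGet? lst c with
    | none => none
    | some v =>
      if isPrimeA v then
        loopA k (lst ++ [p + 1]) (c + 1) (p + 1)
      else
        match smallestDivisorA v with
        | none => none
        | some d =>
          match PySem.List.pySet? lst c (PySem.Int.floordiv v d) with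
          | none => none
          | some lst1 =>
            match PySem.List.pyGet? lst1 (c - 1) with
            | none => none
            | some w =>
              match PySem.List.pySet? lst1 (c - 1) (w + d) with
              | none => none
              | some lst2 => loopA k lst2 (c - 1) p

def prime_ant (n : Int) : Int := (loopA n.toNat [2] 0 2).getD 0

-- ===== PORT B =====
-- the inner 'while k * k <= v' search of first_factor (cache miss path); returns v when no factor
def firstFactorScan (v k : Int) : Int :=
  if k * k ≤ v then
    if PySem.Int.mod v k == 0 then k else firstFactorScan v (k + 1)
  else v
termination_by (v + 1 - k).toNat
decreasing_by
  have h1 : 0 ≤ v := le_trans (mul_self_nonneg k) (by assumption)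
  have h2 : 2 * k ≤ v + 1 := by nlinarith [mul_self_nonneg (k - 1)]
  omega

-- first_factor: consult the cache, on a miss scan and store
def firstFactorMemo (fac : PySem.Dict Int Int) (v : Int) : Int × PySem.Dict Int Int :=
  match fac.get? v with
  | some d => (d, fac)
  | none => (firstFactorScan v 2, fac.insert v (firstFactorScan v 2))

-- the for-loop of B; fuel = len(range(max(n,0)))
def loopB : Nat → PySem.Dict Int Int → List Int → Int → Int → Option Int
  | 0, _, _, c, _ => some c
  | k+1, fac, lst, c, p =>
    match PySem.List.pyGet? lst c with
    | none => none
    | some v =>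
      let r := firstFactorMemo fac v
      if r.1 == v then
        loopB k r.2 (lst ++ [p + 1]) (c + 1) (p + 1)
      else
        match PySem.List.pySet? lst c (PySem.Int.floordiv v r.1) with
        | none => none
        | some lst1 =>
          match PySem.List.pyGet? lst1 (c - 1) with
          | none => none
          | some w =>
            match PySem.List.pySet? lst1 (c - 1) (w + r.1) with
            | none => none
            | some lst2 => loopB k r.2 lst2 (c - 1) p

def prime_ant_alt (n : Int) : Int :=
  (loopB (max n 0).toNat PySem.Dict.empty [2] 0 2).getD 0

-- ===== PRECONDITION & SPEC =====
def Spec_prime_ant (n : Int) (out : Int) : Prop := out = prime_ant_alt n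
instance (n : Int) (out : Int) : Decidable (Spec_prime_ant n out) := by unfold Spec_prime_ant; infer_instance

-- ===== CLAIM (what is proved, stated in full; the proofs are below) =====
def Claim_equal_prime_ant : Prop := ∀ (n : Int), Dom_prime_ant n → Spec_prime_ant n (prime_ant n)

-- ===== LEMMAS AND PROOFS =====

-- characterisation of the scan: starting at k with no divisor in [2, k), it returns the least
-- divisor of v in [2, v] (v itself when v is prime)
theorem ffs_spec (m : Nat) : ∀ (v k : Int), (v + 1 - k).toNat = m → 2 ≤ v → 2 ≤ k →
    (∀ j, 2 ≤ j → j < k → ¬ (j ∣ v)) →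
    (firstFactorScan v k ∣ v) ∧ 2 ≤ firstFactorScan v k ∧ firstFactorScan v k ≤ v ∧
      (∀ e, 2 ≤ e → e ∣ v → firstFactorScan v k ≤ e) := by
  induction m using Nat.strong_induction_on with
  | _ m ih =>
    intro v k hm hv hk hprev
    rw [firstFactorScan]
    split_ifs with h1 h2
    · -- k*k ≤ v and k ∣ v: the scan returns k
      have hdvd : k ∣ v := (PySem.Int.mod_eq_zero_iff_dvd v k).mp (by simpa using h2)
      refine ⟨hdvd, hk, by nlinarith, ?_⟩
      intro e he hedvd
      by_contra hlt
      exact hprev e he (by omega) hedvd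
    · -- k*k ≤ v, k ∤ v: recurse at k+1
      have hkv : k ≤ v := by nlinarith
      have hnd : ¬ (k ∣ v) := fun hd => by
        simp [(PySem.Int.mod_eq_zero_iff_dvd v k).mpr hd] at h2
      exact ih (v + 1 - (k + 1)).toNat (by omega) v (k + 1) rfl hv (by omega)
        (fun j hj hjk hd => by
          rcases lt_or_eq_of_le (by omega : j ≤ k) with h | h
          · exact hprev j hj h hd
          · exact hnd (h ▸ hd))
    · -- k*k > v: no divisor has square ≤ v below k, so v is least — return v
      refine ⟨dvd_refl v, hv, le_refl v, ?_⟩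
      intro e he hedvd
      by_contra hlt
      have hlt' : e < v := by omega
      obtain ⟨q, hq⟩ := id hedvd
      have hq2 : 2 ≤ q := by nlinarith
      rcases le_total e q with hle | hle
      · -- e*e ≤ e*q = v, so e < k, contradicting hprev
        have : e * e ≤ v := by nlinarith
        have : e < k := by nlinarith
        exact hprev e he this hedvd
      · have hqd : q ∣ v := ⟨e, by linarith [hq, mul_comm e q]⟩
        have : q * q ≤ v := by nlinarith
        have : q < k := by nlinarith
        exact hprev q hq2 this hqd

theorem ffs_props (v : Int) (hv : 2 ≤ v) :
    (firstFactorScan v 2 ∣ v) ∧ 2 ≤ firstFactorScan v 2 ∧ firstFactorScan v 2 ≤ v ∧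
      (∀ e, 2 ≤ e → e ∣ v → firstFactorScan v 2 ≤ e) :=
  ffs_spec (v + 1 - 2).toNat v 2 rfl hv (le_refl 2) (fun j hj hjk _ => absurd hjk (by omega))

theorem tdiv_two_eq (v : Int) (hv : 0 ≤ v) : v.tdiv 2 = v / 2 :=
  Int.tdiv_eq_ediv_of_nonneg hv

-- A's primality scan agrees with "the scan found no factor"
theorem prime_iff_ffs (v : Int) (hv : 2 ≤ v) :
    isPrimeA v = true ↔ firstFactorScan v 2 = v := by
  obtain ⟨hdvd, h2, hle, hmin⟩ := ffs_props v hv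
  unfold isPrimeA
  rw [if_pos (by omega), tdiv_two_eq v (by omega)]
  simp only [List.all_eq_true, PySem.List.mem_pyRange_one, Bool.not_eq_eq_eq_not, Bool.not_true,
    beq_eq_false_iff_ne, ne_eq]
  constructor
  · intro hall
    by_contra hne
    have hlt : firstFactorScan v 2 < v := lt_of_le_of_ne hle hne
    obtain ⟨q, hq⟩ := id hdvd
    have hq2 : 2 ≤ q := by nlinarith
    have hhalf : firstFactorScan v 2 ≤ v / 2 := by
      have : 2 * firstFactorScan v 2 ≤ v := by nlinarith
      omega
    exact hall (firstFactorScan v 2) ⟨h2, by omega⟩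
      ((PySem.Int.mod_eq_zero_iff_dvd v _).mpr hdvd)
  · intro heq i ⟨hi2, hiu⟩ hmod
    have hidvd : i ∣ v := (PySem.Int.mod_eq_zero_iff_dvd v i).mp hmod
    have := hmin i hi2 hidvd
    omega

-- A's smallest_divisor is the scan's result (for any v ≥ 2)
theorem smallest_eq_ffs (v : Int) (hv : 2 ≤ v) :
    smallestDivisorA v = some (firstFactorScan v 2) := by
  obtain ⟨hdvd, h2, hle, hmin⟩ := ffs_props v hv
  have hpair : ((PySem.List.pyRange 2 (v + 1) 1).filter
      (fun i => PySem.Int.mod v i == 0)).Pairwise (fun a b => a ≤ b) :=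
    ((PySem.List.pairwise_lt_pyRange_one (a := 2) (b := v + 1)).filter _).imp (fun h => le_of_lt h)
  unfold smallestDivisorA
  rw [PySem.List.sorted_eq_self_of_pairwise _ _ hpair]
  have hsplit : PySem.List.pyRange 2 (v + 1) 1 =
      PySem.List.pyRange 2 (firstFactorScan v 2) 1 ++
      PySem.List.pyRange (firstFactorScan v 2) (v + 1) 1 :=
    PySem.List.pyRange_one_append 2 (firstFactorScan v 2) (v + 1) (by omega) (by omega)
  have hcons : PySem.List.pyRange (firstFactorScan v 2) (v + 1) 1 =
      firstFactorScan v 2 :: PySem.List.pyRange (firstFactorScan v 2 + 1) (v + 1) 1 :=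
    PySem.List.pyRange_one_cons (by omega)
  have hnone : ∀ x ∈ PySem.List.pyRange 2 (firstFactorScan v 2) 1,
      ¬ (PySem.Int.mod v x == 0) = true := by
    intro x hx hmod
    have hb := PySem.List.mem_pyRange_one.mp hx
    have := hmin x hb.1 ((PySem.Int.mod_eq_zero_iff_dvd v x).mp (by simpa using hmod))
    omega
  rw [hsplit, List.filter_append, List.filter_eq_nil_iff.mpr hnone, List.nil_append, hcons]
  rw [List.filter_cons_of_pos (by simpa using (PySem.Int.mod_eq_zero_iff_dvd v _).mpr hdvd)]
  exact PySem.List.pyGet?_zero_cons _ _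

-- composite-step values stay ≥ 2
theorem ffs_quot (v : Int) (hv : 2 ≤ v) (hne : firstFactorScan v 2 ≠ v) :
    2 ≤ PySem.Int.floordiv v (firstFactorScan v 2) := by
  obtain ⟨hdvd, h2, hle, hmin⟩ := ffs_props v hv
  set d := firstFactorScan v 2 with hdset
  obtain ⟨q, hq⟩ := hdvd
  have hq2 : 2 ≤ q := by nlinarith [lt_of_le_of_ne hle hne]
  rw [PySem.Int.floordiv_eq_ediv_of_pos (by omega), hq,
    Int.mul_ediv_cancel_left _ (by omega : d ≠ 0)]
  exact hq2

-- the memo cache invariant: every stored entry is the scan's value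
def FacInv (fac : PySem.Dict Int Int) : Prop :=
  (∀ q ∈ fac.items, q.2 = firstFactorScan q.1 2) ∧ fac.keys.Nodup

theorem memo_fst (fac : PySem.Dict Int Int) (v : Int) (h : FacInv fac) :
    (firstFactorMemo fac v).1 = firstFactorScan v 2 := by
  unfold firstFactorMemo
  rcases hg : fac.get? v with _ | d
  · rfl
  · exact h.1 (v, d) (PySem.Dict.mem_items_of_get?_eq_some fac hg)

theorem memo_snd (fac : PySem.Dict Int Int) (v : Int) (h : FacInv fac) :
    FacInv (firstFactorMemo fac v).2 := by
  unfold firstFactorMemo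
  rcases hg : fac.get? v with _ | d
  · refine ⟨?_, PySem.Dict.nodup_keys_insert fac v _ h.2⟩
    intro q hq
    rcases (PySem.Dict.mem_items_insert _ _ _ _).mp hq with hq | hq
    · rw [hq]
    · exact h.1 q hq.1
  · exact h

theorem mem_of_pyGet? {xs : List Int} {i w : Int} (h : PySem.List.pyGet? xs i = some w) :
    w ∈ xs := PySem.List.mem_of_pyGet?_eq_some xs h

theorem mem_of_pySet? {xs ys : List Int} {i v w : Int}
    (h : PySem.List.pySet? xs i v = some ys) (hw : w ∈ ys) : w ∈ xs ∨ w = v := by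
  unfold PySem.List.pySet? at h
  rcases hk : PySem.List.pyIdx? xs.length i with _ | k
  · rw [hk] at h; simp at h
  · rw [hk] at h; simp at h; subst h
    exact List.mem_or_eq_of_mem_set hw

theorem loop_eq (k : Nat) : ∀ (fac : PySem.Dict Int Int) (lst : List Int) (c p : Int),
    FacInv fac → (∀ x ∈ lst, 2 ≤ x) → 2 ≤ p → loopA k lst c p = loopB k fac lst c p := by
  induction k with
  | zero => intro fac lst c p _ _ _; rfl
  | succ k ih =>
    intro fac lst c p hfac hlst hp
    unfold loopA loopB
    rcases hv : PySem.List.pyGet? lst c with _ | v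
    · rfl
    · dsimp only
      have hv2 : 2 ≤ v := hlst v (mem_of_pyGet? hv)
      rw [memo_fst fac v hfac]
      have hfac' := memo_snd fac v hfac
      by_cases hd : firstFactorScan v 2 = v
      · -- prime step
        rw [if_pos ((prime_iff_ffs v hv2).mpr hd), if_pos (by simpa using hd)]
        exact ih _ (lst ++ [p + 1]) (c + 1) (p + 1) hfac'
          (by intro x hx; rcases List.mem_append.mp hx with hx | hx
              · exact hlst x hx
              · simp at hx; omega)
          (by omega)
      · -- composite step
        rw [if_neg (fun hpr => hd ((prime_iff_ffs v hv2).mp hpr)),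
          if_neg (by simpa using hd), smallest_eq_ffs v hv2]
        dsimp only
        obtain ⟨hdvd, h2, hle, _⟩ := ffs_props v hv2
        have hq2 := ffs_quot v hv2 hd
        rcases h1 : PySem.List.pySet? lst c (PySem.Int.floordiv v (firstFactorScan v 2))
          with _ | lst1
        · rfl
        · dsimp only
          have hlst1 : ∀ x ∈ lst1, 2 ≤ x := by
            intro x hx; rcases mem_of_pySet? h1 hx with hx | hx
            · exact hlst x hx
            · omega
          rcases h2' : PySem.List.pyGet? lst1 (c - 1) with _ | w
          · rfl
          · dsimp only
            rcases h3 : PySem.List.pySet? lst1 (c - 1) (w + firstFactorScan v 2) with _ | lst2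
            · rfl
            · dsimp only
              have hw2 : 2 ≤ w := hlst1 w (mem_of_pyGet? h2')
              exact ih _ lst2 (c - 1) p hfac'
                (by intro x hx; rcases mem_of_pySet? h3 hx with hx | hx
                    · exact hlst1 x hx
                    · omega)
                hp

-- ===== VERDICT (by name: the statement is the Claim_ definition above) =====
theorem prime_ant_spec : Claim_equal_prime_ant := by
  intro n _
  unfold Spec_prime_ant prime_ant prime_ant_alt
  have hn : (max n 0).toNat = n.toNat := by
    rcases le_total n 0 with h | h
    · simp [max_eq_right h, Int.toNat_of_nonpos h]
    · simp [max_eq_left h]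
  rw [hn, loop_eq n.toNat PySem.Dict.empty [2] 0 2
    ⟨by intro q hq; simp [PySem.Dict.empty] at hq, by simp [PySem.Dict.empty]⟩
    (by intro x hx; simp at hx; omega) (by omega)]
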